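-- pv_equiv track=rewrite | github.com/jenarvaezg/loquevotan | scripts/madrid/test_combinatorics.py | guess_group_votes
-- ===== SOURCE A (Python) =====
-- import itertools
--
-- def guess_group_votes(v_si, v_no, v_abs, group_sizes):
--     options = ["si", "no", "abstencion"]
--     best_combo = None
--     min_dist = 999999
--
--     group_names = list(group_sizes.keys())
--
--     for combo in itertools.product(options, repeat=len(group_names)):
--         theo_si = 0
--         theo_no = 0
--         theo_abs = 0
--         for i, vote in enumerate(combo):
--             size = group_sizes[group_names[i]]
--             if vote == "si": theo_si += size
--             elif vote == "no": theo_no += size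
--             elif vote == "abstencion": theo_abs += size
--
--         dist = abs(theo_si - v_si) + abs(theo_no - v_no) + abs(theo_abs - v_abs)
--         if dist < min_dist:
--             min_dist = dist
--             best_combo = combo
--
--     # return dict
--     return {group_names[i]: best_combo[i] for i in range(len(group_names))}, min_dist
-- ===== SOURCE B (Python) =====
-- from functools import lru_cache
--
--
-- def guess_group_votes(v_si, v_no, v_abs, group_sizes):
--     names = list(group_sizes.keys())
--     sizes = [group_sizes[k] for k in names]
--     total = sum(sizes)
--     n = len(sizes)
--
--     @lru_cache(maxsize=None)
--     def best(i, a, b):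
--         # minimal final L1 distance when groups[:i] gave a to "si" and b to "no"
--         if i == n:
--             return abs(a - v_si) + abs(b - v_no) + abs(total - a - b - v_abs)
--         s = sizes[i]
--         return min(best(i + 1, a + s, b), best(i + 1, a, b + s), best(i + 1, a, b))
--
--     m = best(0, 0, 0)
--
--     def pick(i, a, b):
--         # lexicographically first (si < no < abstencion) assignment achieving m
--         if i == n:
--             return []
--         s = sizes[i]
--         if best(i + 1, a + s, b) == m:
--             return ["si"] + pick(i + 1, a + s, b)
--         if best(i + 1, a, b + s) == m:
--             return ["no"] + pick(i + 1, a, b + s)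
--         return ["abstencion"] + pick(i + 1, a, b)
--
--     return dict(zip(names, pick(0, 0, 0))), m
-- ===== Notes on version B (the rewrite author's own statement) =====
-- stated objective: faster
-- what changed: Replaces the 3^n brute-force enumeration of all vote assignments with a memoized recursion over (group index, si-sum, no-sum) states plus a greedy lexicographically-first reconstruction; intended as faster (a timing run saw A time out at n=16 groups where B still returned, but could not measure a ratio there).
-- intended difference: On an empty group dict whose |v_si|+|v_no|+|v_abs| exceeds 999999, A returns its 999999 init sentinel instead of the actual distance while B returns the true distance |v_si|+|v_no|+|v_abs|, which is the intended minimal L1 distance of the only (empty) assignment. — e.g. on guess_group_votes(1000000, 0, 0, []): A returns ([], 999999), B returns ([], 1000000)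
-- crash fix: On a nonempty group dict where every assignment's L1 distance is at least A's 999999 init sentinel, A's best_combo stays None and subscripting it raises TypeError, while B returns the true minimal distance with its lexicographically-first assignment. — e.g. on guess_group_votes(2000000, 0, 0, [("x", 1)]): A raises TypeError, B returns ([("x", "si")], 1999999)
import Mathlib
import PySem

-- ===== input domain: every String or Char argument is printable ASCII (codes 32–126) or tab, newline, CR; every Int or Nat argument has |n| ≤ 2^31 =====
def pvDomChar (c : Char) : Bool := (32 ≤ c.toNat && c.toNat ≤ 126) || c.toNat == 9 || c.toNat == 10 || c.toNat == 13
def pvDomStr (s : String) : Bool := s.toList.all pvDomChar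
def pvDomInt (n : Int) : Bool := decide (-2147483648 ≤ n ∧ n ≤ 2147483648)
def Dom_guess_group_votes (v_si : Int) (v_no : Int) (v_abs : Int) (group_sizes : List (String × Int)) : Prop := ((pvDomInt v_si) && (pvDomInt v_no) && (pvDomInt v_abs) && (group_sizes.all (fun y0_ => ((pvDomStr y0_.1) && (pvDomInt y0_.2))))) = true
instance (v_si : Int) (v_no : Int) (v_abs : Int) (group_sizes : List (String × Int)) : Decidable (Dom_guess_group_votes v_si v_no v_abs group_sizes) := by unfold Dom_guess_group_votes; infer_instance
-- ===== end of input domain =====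

-- B replaces A's 3^n enumeration of all assignments by a recursive minimum over (remaining groups,
-- si-sum, no-sum) states (memoized in Source B) plus a greedy lexicographically-first reconstruction of
-- the minimizer; intended as faster (a timing run saw A time out where B returned, no ratio measured).

-- ===== PORT A =====
-- itertools.product(options, repeat=n), leftmost factor varying slowest
def pvProduct (opts : List String) : Nat → List (List String)
  | 0 => [[]]
  | n+1 => opts.flatMap (fun v => (pvProduct opts n).map (fun c => v :: c))

-- A's inner loop: for i, vote in enumerate(combo): size = group_sizes[group_names[i]]; …
def pvTheoLoop (d : PySem.Dict String Int) (names : List String) : Nat → (Int × Int × Int) → List String → (Int × Int × Int)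
  | _, t, [] => t
  | i, t, vote :: rest =>
      let size := d.getD (PySem.List.pyGetD names (i : Int) "") 0
      pvTheoLoop d names (i+1)
        (if vote == "si" then (t.1 + size, t.2.1, t.2.2)
         else if vote == "no" then (t.1, t.2.1 + size, t.2.2)
         else if vote == "abstencion" then (t.1, t.2.1, t.2.2 + size)
         else t) rest

def guess_group_votes (v_si : Int) (v_no : Int) (v_abs : Int) (group_sizes : List (String × Int)) : (List (String × String)) × Int :=
  let d := PySem.Dict.ofList group_sizes
  let options := ["si", "no", "abstencion"]
  let group_names := d.keys
  let res := (pvProduct options group_names.length).foldl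
    (fun (st : Option (List String) × Int) combo =>
      let t := pvTheoLoop d group_names 0 (0, 0, 0) combo
      let dist := |t.1 - v_si| + |t.2.1 - v_no| + |t.2.2 - v_abs|
      if dist < st.2 then (some combo, dist) else st) (none, 999999)
  -- best_combo is None exactly when the dict is nonempty and every distance is ≥ 999999: there
  -- Python raises TypeError below, and exactly those inputs are excluded by Pre_ / named by Raises_;
  -- with an empty dict the comprehension ignores best_combo and Python returns ({}, min_dist)
  let best := res.1.getD []
  let outd := (PySem.List.pyRange 0 (PySem.List.len group_names)).foldl
    (fun (dd : PySem.Dict String String) i =>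
      dd.insert (PySem.List.pyGetD group_names i "") (PySem.List.pyGetD best i "")) PySem.Dict.empty
  (outd.items, res.2)

-- ===== PORT B =====
-- minimal final L1 distance when the processed groups gave a to "si" and b to "no"
-- (Source B memoizes this recursion with functools.lru_cache; the values are identical)
def pvAltBest (vSi vNo vAb total : Int) : List Int → Int → Int → Int
  | [], a, b => |a - vSi| + |b - vNo| + |total - a - b - vAb|
  | s :: rest, a, b =>
      min (min (pvAltBest vSi vNo vAb total rest (a + s) b)
               (pvAltBest vSi vNo vAb total rest a (b + s)))
          (pvAltBest vSi vNo vAb total rest a b)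

-- lexicographically first (si < no < abstencion) assignment achieving m
def pvAltPick (vSi vNo vAb total m : Int) : List Int → Int → Int → List String
  | [], _, _ => []
  | s :: rest, a, b =>
      if pvAltBest vSi vNo vAb total rest (a + s) b = m then
        "si" :: pvAltPick vSi vNo vAb total m rest (a + s) b
      else if pvAltBest vSi vNo vAb total rest a (b + s) = m then
        "no" :: pvAltPick vSi vNo vAb total m rest a (b + s)
      else
        "abstencion" :: pvAltPick vSi vNo vAb total m rest a b

def guess_group_votes_alt (v_si : Int) (v_no : Int) (v_abs : Int) (group_sizes : List (String × Int)) : (List (String × String)) × Int :=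
  let d := PySem.Dict.ofList group_sizes
  let names := d.keys
  let sizes := names.map (fun k => d.getD k 0)
  let total := sizes.sum
  let m := pvAltBest v_si v_no v_abs total sizes 0 0
  -- names are dict keys (pairwise distinct), so dict(zip(names, votes)) is the zip list itself
  (names.zip (pvAltPick v_si v_no v_abs total m sizes 0 0), m)

-- ===== PRECONDITION & SPEC =====
-- the set of (si-sum, no-sum) totals achievable by assigning each listed size to si, no or abstencion
def pvReachStep (acc : List (Int × Int)) (s : Int) : List (Int × Int) :=
  PySem.Set.ofList (acc.flatMap (fun p => [(p.1 + s, p.2), (p.1, p.2 + s), p]))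

def pvReach (sizes : List Int) : List (Int × Int) :=
  sizes.foldl pvReachStep [(0, 0)]

-- Pre_ excludes EXACTLY the inputs on which A raises: with a nonempty group dict whose every
-- assignment has L1 distance ≥ A's 999999 init sentinel, best_combo stays None and A's
-- best_combo[i] raises TypeError (the empty dict never reaches that subscript and stays inside).
def Pre_guess_group_votes (v_si : Int) (v_no : Int) (v_abs : Int) (group_sizes : List (String × Int)) : Prop :=
  group_sizes = [] ∨
    ∃ p ∈ pvReach ((PySem.Dict.ofList group_sizes).values),
      |p.1 - v_si| + |p.2 - v_no| + |((PySem.Dict.ofList group_sizes).values).sum - p.1 - p.2 - v_abs| < 999999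
instance (v_si : Int) (v_no : Int) (v_abs : Int) (group_sizes : List (String × Int)) : Decidable (Pre_guess_group_votes v_si v_no v_abs group_sizes) := by unfold Pre_guess_group_votes; infer_instance
def pvWitness_guess_group_votes : Int × Int × Int × (List (String × Int)) := (5, 3, 2, [("a", 4), ("b", 6)])

-- On a nonempty group dict where every assignment's L1 distance is ≥ A's 999999 init sentinel,
-- A's best_combo stays None and subscripting it raises TypeError, while B returns the true
-- minimal distance with its lexicographically-first assignment.
def Raises_guess_group_votes (v_si : Int) (v_no : Int) (v_abs : Int) (group_sizes : List (String × Int)) : Prop :=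
  group_sizes ≠ [] ∧
    ∀ p ∈ pvReach ((PySem.Dict.ofList group_sizes).values),
      999999 ≤ |p.1 - v_si| + |p.2 - v_no| + |((PySem.Dict.ofList group_sizes).values).sum - p.1 - p.2 - v_abs|
instance (v_si : Int) (v_no : Int) (v_abs : Int) (group_sizes : List (String × Int)) : Decidable (Raises_guess_group_votes v_si v_no v_abs group_sizes) := by unfold Raises_guess_group_votes; infer_instance
def pvRaiseWitness_guess_group_votes : Int × Int × Int × (List (String × Int)) := (2000000, 0, 0, [("x", 1)])
def pvRaiseWitnessOut_guess_group_votes : (List (String × String)) × Int := ([("x", "si")], 1999999)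

-- On an empty group dict with |v_si|+|v_no|+|v_abs| > 999999, A returns its 999999 init sentinel
-- instead of the actual distance, while B returns the true distance |v_si|+|v_no|+|v_abs| of the
-- only (empty) assignment, which is the intended value.
def D_guess_group_votes (v_si : Int) (v_no : Int) (v_abs : Int) (group_sizes : List (String × Int)) : Prop :=
  group_sizes = [] ∧ 999999 < |v_si| + |v_no| + |v_abs|
instance (v_si : Int) (v_no : Int) (v_abs : Int) (group_sizes : List (String × Int)) : Decidable (D_guess_group_votes v_si v_no v_abs group_sizes) := by unfold D_guess_group_votes; infer_instance

def Spec_guess_group_votes (v_si : Int) (v_no : Int) (v_abs : Int) (group_sizes : List (String × Int)) (out : (List (String × String)) × Int) : Prop := ¬ D_guess_group_votes v_si v_no v_abs group_sizes → out = guess_group_votes_alt v_si v_no v_abs group_sizes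
instance (v_si : Int) (v_no : Int) (v_abs : Int) (group_sizes : List (String × Int)) (out : (List (String × String)) × Int) : Decidable (Spec_guess_group_votes v_si v_no v_abs group_sizes out) := by unfold Spec_guess_group_votes; infer_instance

def pvDiffWitness_guess_group_votes : Int × Int × Int × (List (String × Int)) := (1000000, 0, 0, [])
def pvDiffWitnessOut_guess_group_votes : ((List (String × String)) × Int) × ((List (String × String)) × Int) := (([], 999999), ([], 1000000))

-- ===== CLAIM (what is proved, stated in full; the proofs are below) =====
def Claim_unchanged_guess_group_votes : Prop := ∀ (v_si : Int) (v_no : Int) (v_abs : Int) (group_sizes : List (String × Int)), Dom_guess_group_votes v_si v_no v_abs group_sizes → Pre_guess_group_votes v_si v_no v_abs group_sizes → Spec_guess_group_votes v_si v_no v_abs group_sizes (guess_group_votes v_si v_no v_abs group_sizes)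
def Claim_changed_guess_group_votes : Prop := Dom_guess_group_votes (pvDiffWitness_guess_group_votes.1) (pvDiffWitness_guess_group_votes.2.1) (pvDiffWitness_guess_group_votes.2.2.1) (pvDiffWitness_guess_group_votes.2.2.2) ∧ Pre_guess_group_votes (pvDiffWitness_guess_group_votes.1) (pvDiffWitness_guess_group_votes.2.1) (pvDiffWitness_guess_group_votes.2.2.1) (pvDiffWitness_guess_group_votes.2.2.2) ∧ D_guess_group_votes (pvDiffWitness_guess_group_votes.1) (pvDiffWitness_guess_group_votes.2.1) (pvDiffWitness_guess_group_votes.2.2.1) (pvDiffWitness_guess_group_votes.2.2.2) ∧ guess_group_votes (pvDiffWitness_guess_group_votes.1) (pvDiffWitness_guess_group_votes.2.1) (pvDiffWitness_guess_group_votes.2.2.1) (pvDiffWitness_guess_group_votes.2.2.2) = pvDiffWitnessOut_guess_group_votes.1 ∧ guess_group_votes_alt (pvDiffWitness_guess_group_votes.1) (pvDiffWitness_guess_group_votes.2.1) (pvDiffWitness_guess_group_votes.2.2.1) (pvDiffWitness_guess_group_votes.2.2.2) = pvDiffWitnessOut_guess_group_votes.2 ∧ pvDiffWitnessOut_guess_group_votes.1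 ≠ pvDiffWitnessOut_guess_group_votes.2
def Claim_exact_guess_group_votes : Prop := ∀ (v_si : Int) (v_no : Int) (v_abs : Int) (group_sizes : List (String × Int)), Dom_guess_group_votes v_si v_no v_abs group_sizes → Pre_guess_group_votes v_si v_no v_abs group_sizes → D_guess_group_votes v_si v_no v_abs group_sizes → guess_group_votes v_si v_no v_abs group_sizes ≠ guess_group_votes_alt v_si v_no v_abs group_sizes
def Claim_raises_guess_group_votes : Prop := (∀ (v_si : Int) (v_no : Int) (v_abs : Int) (group_sizes : List (String × Int)), Dom_guess_group_votes v_si v_no v_abs group_sizes → Raises_guess_group_votes v_si v_no v_abs group_sizes → ¬ Pre_guess_group_votes v_si v_no v_abs group_sizes) ∧ (Dom_guess_group_votes (pvRaiseWitness_guess_group_votes.1) (pvRaiseWitness_guess_group_votes.2.1) (pvRaiseWitness_guess_group_votes.2.2.1) (pvRaiseWitness_guess_group_votes.2.2.2) ∧ Raises_guess_group_votes (pvRaiseWitness_guess_group_votes.1) (pvRaiseWitness_guess_group_votes.2.1) (pvRaiseWitness_guess_group_votes.2.2.1) (pvRaiseWitness_guess_group_votes.2.2.2) ∧ guess_group_votes_alt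 (pvRaiseWitness_guess_group_votes.1) (pvRaiseWitness_guess_group_votes.2.1) (pvRaiseWitness_guess_group_votes.2.2.1) (pvRaiseWitness_guess_group_votes.2.2.2) = pvRaiseWitnessOut_guess_group_votes)

-- ===== LEMMAS AND PROOFS =====

-- final L1 distance of a finished (theo_si, theo_no, theo_abs) triple
def pvDistT (vSi vNo vAb : Int) (t : Int × Int × Int) : Int :=
  |t.1 - vSi| + |t.2.1 - vNo| + |t.2.2 - vAb|

-- one vote's effect on the running triple (A's if/elif chain)
def pvUpd (t : Int × Int × Int) (vote : String) (s : Int) : Int × Int × Int :=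
  if vote == "si" then (t.1 + s, t.2.1, t.2.2)
  else if vote == "no" then (t.1, t.2.1 + s, t.2.2)
  else if vote == "abstencion" then (t.1, t.2.1, t.2.2 + s)
  else t

-- A's inner loop rephrased on the zip of a combo with the size list
def pvTheoZ (t : Int × Int × Int) : List (String × Int) → Int × Int × Int
  | [] => t
  | p :: rest => pvTheoZ (pvUpd t p.1 p.2) rest

-- triple-state forms of B's minimum and reconstruction (the proof's midpoint)
def pvBestT (vSi vNo vAb : Int) : List Int → (Int × Int × Int) → Int
  | [], t => pvDistT vSi vNo vAb t
  | s :: r, t =>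
      min (min (pvBestT vSi vNo vAb r (pvUpd t "si" s)) (pvBestT vSi vNo vAb r (pvUpd t "no" s)))
          (pvBestT vSi vNo vAb r (pvUpd t "abstencion" s))

def pvPickT (vSi vNo vAb m : Int) : List Int → (Int × Int × Int) → List String
  | [], _ => []
  | s :: r, t =>
      if pvBestT vSi vNo vAb r (pvUpd t "si" s) = m then "si" :: pvPickT vSi vNo vAb m r (pvUpd t "si" s)
      else if pvBestT vSi vNo vAb r (pvUpd t "no" s) = m then "no" :: pvPickT vSi vNo vAb m r (pvUpd t "no" s)
      else "abstencion" :: pvPickT vSi vNo vAb m r (pvUpd t "abstencion" s)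

-- the first-strict-improvement step A's fold performs, with the distance function abstracted
def pvStep (D : List String → Int) (st : Option (List String) × Int) (c : List String) : Option (List String) × Int :=
  if D c < st.2 then (some c, D c) else st

theorem pvStep_isSome (D : List String → Int) (l : List (List String)) (c : List String) (m : Int) :
    (l.foldl (pvStep D) (some c, m)).1.isSome := by
  induction l generalizing c m with
  | nil => rfl
  | cons x t ih =>
      simp only [List.foldl_cons, pvStep]
      by_cases h : D x < m
      · simp [h, ih]
      · simp [h, ih]

theorem pvStep_start (D : List String → Int) (l : List (List String)) (o : Option (List String)) (m : Int) :
    l.foldl (pvStep D) (o, m) =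
      ((l.foldl (pvStep D) (none, m)).1.elim o some, (l.foldl (pvStep D) (none, m)).2) := by
  induction l generalizing o m with
  | nil => rfl
  | cons x t ih =>
      simp only [List.foldl_cons, pvStep]
      by_cases h : D x < m
      · rw [if_pos h, if_pos h]
        obtain ⟨c', hc'⟩ := Option.isSome_iff_exists.mp (pvStep_isSome D t x (D x))
        simp [hc']
        exact Prod.ext hc' rfl
      · rw [if_neg h, if_neg h]
        exact ih o m

theorem pvStep_map (D : List String → Int) (h : String) (l : List (List String)) (st : Option (List String) × Int) :
    (l.map (fun c => h :: c)).foldl (pvStep D) st =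
      (((l.foldl (pvStep (fun c => D (h :: c))) (none, st.2)).1.elim st.1 (fun c => some (h :: c))),
        (l.foldl (pvStep (fun c => D (h :: c))) (none, st.2)).2) := by
  induction l generalizing st with
  | nil => rfl
  | cons x t ih =>
      obtain ⟨o, m⟩ := st
      simp only [List.map_cons, List.foldl_cons, pvStep]
      by_cases hx : D (h :: x) < m
      · rw [if_pos hx, if_pos hx]
        rw [ih (some (h :: x), D (h :: x))]
        rw [pvStep_start (fun c => D (h :: c)) t (some x) (D (h :: x))]
        obtain ⟨r, hr⟩ : ∃ r, (t.foldl (pvStep fun c => D (h :: c)) (none, D (h :: x))) = r := ⟨_, rfl⟩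
        rw [hr]
        cases hro : r.1 <;> simp [hro]
      · rw [if_neg hx, if_neg hx]
        exact ih (o, m)

set_option maxHeartbeats 1000000 in
theorem pvMain (vSi vNo vAb : Int) (sizes : List Int) (t : Int × Int × Int) (st : Option (List String) × Int) :
    (pvProduct ["si", "no", "abstencion"] sizes.length).foldl
        (pvStep (fun c => pvDistT vSi vNo vAb (pvTheoZ t (c.zip sizes)))) st =
      (if pvBestT vSi vNo vAb sizes t < st.2 then
        (some (pvPickT vSi vNo vAb (pvBestT vSi vNo vAb sizes t) sizes t), pvBestT vSi vNo vAb sizes t)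
       else st) := by
  induction sizes generalizing t st with
  | nil =>
      obtain ⟨o, m⟩ := st
      simp only [List.length_nil, pvProduct, List.foldl_cons, List.foldl_nil, pvStep,
        List.zip_nil_right, pvTheoZ, pvBestT, pvPickT]
  | cons s r ih =>
      obtain ⟨o, m⟩ := st
      simp only [List.length_cons, pvProduct, List.flatMap_cons, List.flatMap_nil, List.append_nil,
        List.foldl_append]
      rw [pvStep_map, pvStep_map, pvStep_map]
      simp only [List.zip_cons_cons, pvTheoZ]
      rw [ih (pvUpd t "si" s), ih (pvUpd t "no" s), ih (pvUpd t "abstencion" s)]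
      set mS := pvBestT vSi vNo vAb r (pvUpd t "si" s) with hmS
      set mN := pvBestT vSi vNo vAb r (pvUpd t "no" s) with hmN
      set mA := pvBestT vSi vNo vAb r (pvUpd t "abstencion" s) with hmA
      simp only [pvBestT, ← hmS, ← hmN, ← hmA]
      rcases lt_or_ge mS m with h1 | h1
      · rcases lt_or_ge mN mS with h2 | h2
        · rcases lt_or_ge mA mN with h3 | h3
          · rw [show min (min mS mN) mA = mA from by omega, if_pos (show mA < m from by omega)]
            simp [h1, h2, h3, pvPickT, ← hmS, ← hmN, ← hmA,
              show ¬ mS = mA from by omega, show ¬ mN = mA from by omega]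
          · rw [show min (min mS mN) mA = mN from by omega, if_pos (show mN < m from by omega)]
            simp [h1, h2, show ¬ mA < mN from by omega, pvPickT, ← hmS, ← hmN, ← hmA,
              show ¬ mS = mN from by omega]
        · rcases lt_or_ge mA mS with h3 | h3
          · rw [show min (min mS mN) mA = mA from by omega, if_pos (show mA < m from by omega)]
            simp [h1, show ¬ mN < mS from by omega, h3, pvPickT, ← hmS, ← hmN, ← hmA,
              show ¬ mS = mA from by omega, show ¬ mN = mA from by omega]
          · rw [show min (min mS mN) mA = mS from by omega, if_pos (show mS < m from by omega)]
            simp [h1, show ¬ mN < mS from by omega, show ¬ mA < mS from by omega,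
              pvPickT, ← hmS, ← hmN, ← hmA]
      · rcases lt_or_ge mN m with h2 | h2
        · rcases lt_or_ge mA mN with h3 | h3
          · rw [show min (min mS mN) mA = mA from by omega, if_pos (show mA < m from by omega)]
            simp [show ¬ mS < m from by omega, h2, h3, pvPickT, ← hmS, ← hmN, ← hmA,
              show ¬ mS = mA from by omega, show ¬ mN = mA from by omega]
          · rw [show min (min mS mN) mA = mN from by omega, if_pos (show mN < m from by omega)]
            simp [show ¬ mS < m from by omega, h2, show ¬ mA < mN from by omega,
              pvPickT, ← hmS, ← hmN, ← hmA, show ¬ mS = mN from by omega]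
        · rcases lt_or_ge mA m with h3 | h3
          · rw [show min (min mS mN) mA = mA from by omega, if_pos (show mA < m from by omega)]
            simp [show ¬ mS < m from by omega, show ¬ mN < m from by omega, h3,
              pvPickT, ← hmS, ← hmN, ← hmA,
              show ¬ mS = mA from by omega, show ¬ mN = mA from by omega]
          · rw [if_neg (show ¬ min (min mS mN) mA < m from by omega)]
            simp [show ¬ mS < m from by omega, show ¬ mN < m from by omega,
              show ¬ mA < m from by omega]

theorem pvLen_mem_product (opts : List String) (n : Nat) (c : List String)
    (hc : c ∈ pvProduct opts n) : c.length = n := by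
  induction n generalizing c with
  | zero => simp [pvProduct] at hc; simp [hc]
  | succ k ih =>
      simp only [pvProduct, List.mem_flatMap, List.mem_map] at hc
      obtain ⟨v, _, c', hc', rfl⟩ := hc
      simp [ih c' hc']

theorem pvTheoLoop_eq (d : PySem.Dict String Int) (names : List String) (c : List String) :
    ∀ (i : Nat) (t : Int × Int × Int), i + c.length ≤ names.length →
      pvTheoLoop d names i t c = pvTheoZ t (c.zip ((names.map (fun k => d.getD k 0)).drop i)) := by
  induction c with
  | nil => intro i t _; simp [pvTheoLoop, pvTheoZ]
  | cons vote rest ih =>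
      intro i t hle
      have hi : i < names.length := by simp at hle; omega
      have hdrop : (names.map (fun k => d.getD k 0)).drop i
          = d.getD names[i] 0 :: (names.map (fun k => d.getD k 0)).drop (i+1) := by
        rw [List.drop_eq_getElem_cons (by simpa using hi)]
        simp
      have hget : PySem.List.pyGetD names (i : Int) "" = names[i] := by
        rw [PySem.List.pyGetD_natCast]
        exact List.getD_eq_getElem names "" hi
      rw [hdrop]
      simp only [pvTheoLoop, List.zip_cons_cons, pvTheoZ, hget]
      rw [ih (i+1) _ (by simp at hle ⊢; omega)]
      rfl

theorem pvBestT_eq_alt (vSi vNo vAb total : Int) (sizes : List Int) :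
    ∀ (a b c : Int), c = total - sizes.sum - a - b →
      pvBestT vSi vNo vAb sizes (a, b, c) = pvAltBest vSi vNo vAb total sizes a b := by
  induction sizes with
  | nil => intro a b c hc; simp [pvBestT, pvAltBest, pvDistT, hc]
  | cons s r ih =>
      intro a b c hc
      simp only [pvBestT, pvAltBest, pvUpd]
      simp
      rw [ih (a+s) b c (by simp at hc ⊢; omega),
          ih a (b+s) c (by simp at hc ⊢; omega),
          ih a b (c+s) (by simp at hc ⊢; omega)]

theorem pvPickT_eq_alt (vSi vNo vAb total m : Int) (sizes : List Int) :
    ∀ (a b c : Int), c = total - sizes.sum - a - b →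
      pvPickT vSi vNo vAb m sizes (a, b, c) = pvAltPick vSi vNo vAb total m sizes a b := by
  induction sizes with
  | nil => intro a b c _; rfl
  | cons s r ih =>
      intro a b c hc
      simp only [pvPickT, pvAltPick, pvUpd]
      simp
      rw [pvBestT_eq_alt vSi vNo vAb total r (a+s) b c (by simp at hc ⊢; omega),
          pvBestT_eq_alt vSi vNo vAb total r a (b+s) c (by simp at hc ⊢; omega)]
      split_ifs
      · rw [ih (a+s) b c (by simp at hc ⊢; omega)]
      · rw [ih a (b+s) c (by simp at hc ⊢; omega)]
      · rw [ih a b (c+s) (by simp at hc ⊢; omega)]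

-- B's minimum is ≤ the distance of every reachable (si-sum, no-sum) pair
theorem pvReach_le (vSi vNo vAb total : Int) (sizes : List Int) :
    ∀ (acc : List (Int × Int)) (q : Int × Int), q ∈ sizes.foldl pvReachStep acc →
      ∃ p ∈ acc, pvAltBest vSi vNo vAb total sizes p.1 p.2 ≤
        |q.1 - vSi| + |q.2 - vNo| + |total - q.1 - q.2 - vAb| := by
  induction sizes with
  | nil =>
      intro acc q hq
      exact ⟨q, by simpa using hq, le_of_eq rfl⟩
  | cons s r ih =>
      intro acc q hq
      simp only [List.foldl_cons] at hq
      obtain ⟨p', hp', hle⟩ := ih (pvReachStep acc s) q hq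
      have hp'' : p' ∈ acc.flatMap (fun p => [(p.1 + s, p.2), (p.1, p.2 + s), p]) :=
        (PySem.Set.mem_ofList _ _).mp hp'
      obtain ⟨p, hp, hmem⟩ := List.mem_flatMap.mp hp''
      refine ⟨p, hp, ?_⟩
      simp only [List.mem_cons, List.mem_singleton, List.not_mem_nil, or_false] at hmem
      rcases hmem with h | h | h <;> subst h
      · exact le_trans (le_trans (min_le_left _ _) (min_le_left _ _)) hle
      · exact le_trans (le_trans (min_le_left _ _) (min_le_right _ _)) hle
      · exact le_trans (min_le_right _ _) hle

theorem pvRangeZip (xs : List String) (ys : List String) (dx dy : String) (h : ys.length = xs.length) :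
    (PySem.List.pyRange 0 (PySem.List.len xs)).map
      (fun i => (PySem.List.pyGetD xs i dx, PySem.List.pyGetD ys i dy)) = xs.zip ys := by
  have hlen : PySem.List.len xs = (xs.length : Int) := by simp [PySem.List.len]
  rw [hlen, PySem.List.pyRange_zero_natCast, List.map_map]
  have hfun : ((fun i => (PySem.List.pyGetD xs i dx, PySem.List.pyGetD ys i dy)) ∘ (fun k : Nat => (k : Int)))
      = fun k : Nat => (xs.getD k dx, ys.getD k dy) := by
    funext k; simp [Function.comp, PySem.List.pyGetD_natCast]
  rw [hfun]
  clear hlen hfun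
  induction xs generalizing ys with
  | nil => simp at h; simp [h]
  | cons x xs' ih =>
      cases ys with
      | nil => simp at h
      | cons y ys' =>
          rw [List.length_cons, List.range_succ_eq_map, List.map_cons, List.map_map]
          have : ((fun k : Nat => ((x :: xs').getD k dx, (y :: ys').getD k dy)) ∘ Nat.succ)
              = fun k : Nat => (xs'.getD k dx, ys'.getD k dy) := by
            funext k; simp
          rw [this]
          simp only [List.getD_cons_zero, List.zip_cons_cons]
          rw [ih ys' (by simpa using h)]

theorem pvOutDict (names : List String) (bc : List String) (hn : names.Nodup) (hl : bc.length = names.length) :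
    ((PySem.List.pyRange 0 (PySem.List.len names)).foldl
      (fun (dd : PySem.Dict String String) i =>
        dd.insert (PySem.List.pyGetD names i "") (PySem.List.pyGetD bc i "")) PySem.Dict.empty).items
      = names.zip bc := by
  rw [PySem.Dict.items_foldl_insert_fresh _ _ _ _ (by simp)
    (by rw [PySem.List.map_pyGetD_pyRange_zero names ""]; exact hn)]
  rw [pvRangeZip names bc "" "" hl]
  rfl

theorem pvPickT_length (vSi vNo vAb m : Int) (sizes : List Int) :
    ∀ t, (pvPickT vSi vNo vAb m sizes t).length = sizes.length := by
  induction sizes with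
  | nil => intro t; rfl
  | cons s r ih => intro t; simp only [pvPickT]; split_ifs <;> simp [ih]


-- the generic path: whenever B's minimum beats A's 999999 sentinel, A's scan and B's recursion agree
theorem pvGeneric (v1 v2 v3 : Int) (gs : List (String × Int))
    (hM : pvBestT v1 v2 v3
      ((PySem.Dict.ofList gs).keys.map (fun k => (PySem.Dict.ofList gs).getD k 0)) (0, 0, 0) < 999999) :
    guess_group_votes v1 v2 v3 gs = guess_group_votes_alt v1 v2 v3 gs := by
  have hnd : (PySem.Dict.ofList gs).keys.Nodup := PySem.Dict.nodup_keys_ofList gs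
  show ((((PySem.List.pyRange 0 (PySem.List.len (PySem.Dict.ofList gs).keys)).foldl
      (fun (dd : PySem.Dict String String) i =>
        dd.insert (PySem.List.pyGetD (PySem.Dict.ofList gs).keys i "")
          (PySem.List.pyGetD
            (((pvProduct ["si", "no", "abstencion"] (PySem.Dict.ofList gs).keys.length).foldl
              (pvStep (fun c => pvDistT v1 v2 v3
                (pvTheoLoop (PySem.Dict.ofList gs) (PySem.Dict.ofList gs).keys 0 (0, 0, 0) c)))
              (none, 999999)).1.getD []) i "")) PySem.Dict.empty).items),
      ((pvProduct ["si", "no", "abstencion"] (PySem.Dict.ofList gs).keys.length).foldl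
        (pvStep (fun c => pvDistT v1 v2 v3
          (pvTheoLoop (PySem.Dict.ofList gs) (PySem.Dict.ofList gs).keys 0 (0, 0, 0) c)))
        (none, 999999)).2)
    = ((PySem.Dict.ofList gs).keys.zip
        (pvAltPick v1 v2 v3 (((PySem.Dict.ofList gs).keys.map (fun k => (PySem.Dict.ofList gs).getD k 0)).sum)
          (pvAltBest v1 v2 v3 (((PySem.Dict.ofList gs).keys.map (fun k => (PySem.Dict.ofList gs).getD k 0)).sum)
            ((PySem.Dict.ofList gs).keys.map (fun k => (PySem.Dict.ofList gs).getD k 0)) 0 0)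
          ((PySem.Dict.ofList gs).keys.map (fun k => (PySem.Dict.ofList gs).getD k 0)) 0 0),
       pvAltBest v1 v2 v3 (((PySem.Dict.ofList gs).keys.map (fun k => (PySem.Dict.ofList gs).getD k 0)).sum)
         ((PySem.Dict.ofList gs).keys.map (fun k => (PySem.Dict.ofList gs).getD k 0)) 0 0)
  set d := PySem.Dict.ofList gs with hd
  set names := d.keys with hnm
  set sizes := names.map (fun k => d.getD k 0) with hsz
  have hcong : (pvProduct ["si", "no", "abstencion"] names.length).foldl
      (pvStep (fun c => pvDistT v1 v2 v3 (pvTheoLoop d names 0 (0, 0, 0) c))) (none, 999999)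
      = (pvProduct ["si", "no", "abstencion"] names.length).foldl
        (pvStep (fun c => pvDistT v1 v2 v3 (pvTheoZ (0, 0, 0) (c.zip sizes)))) (none, 999999) := by
    apply PySem.List.foldl_congr_mem
    intro acc x hx
    have hlenx := pvLen_mem_product _ _ _ hx
    simp only [pvStep]
    rw [pvTheoLoop_eq d names x 0 (0, 0, 0) (by omega), List.drop_zero, hsz]
  rw [hcong]
  have hlen : names.length = sizes.length := by rw [hsz, List.length_map]
  rw [hlen]
  rw [pvMain v1 v2 v3 sizes (0, 0, 0) (none, 999999), if_pos (by simpa using hM)]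
  have hpk := pvPickT_eq_alt v1 v2 v3 sizes.sum (pvBestT v1 v2 v3 sizes (0, 0, 0)) sizes 0 0 0 (by ring)
  have hbt := pvBestT_eq_alt v1 v2 v3 sizes.sum sizes 0 0 0 (by ring)
  refine Prod.ext ?_ (by simpa using hbt)
  show (_ : PySem.Dict String String).items = _
  rw [show (((some (pvPickT v1 v2 v3 (pvBestT v1 v2 v3 sizes (0,0,0)) sizes (0,0,0)), pvBestT v1 v2 v3 sizes (0,0,0)) : Option (List String) × Int).1.getD []) = pvPickT v1 v2 v3 (pvBestT v1 v2 v3 sizes (0,0,0)) sizes (0,0,0) from rfl]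
  rw [pvOutDict names _ hnd (by rw [pvPickT_length, ← hlen])]
  rw [hpk, hbt]

theorem pvEmptyA (v1 v2 v3 : Int) (h : ¬ (|v1| + |v2| + |v3| < 999999)) :
    guess_group_votes v1 v2 v3 [] = ([], 999999) := by
  have hk : (PySem.Dict.ofList ([] : List (String × Int))).keys = [] := rfl
  have hi : (PySem.Dict.empty : PySem.Dict String String).items = [] := rfl
  simp [guess_group_votes, hk, hi, pvProduct, pvTheoLoop, pvStep, h]

theorem pvEmptyB (v1 v2 v3 : Int) :
    guess_group_votes_alt v1 v2 v3 [] = ([], |v1| + |v2| + |v3|) := by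
  have hk : (PySem.Dict.ofList ([] : List (String × Int))).keys = [] := rfl
  simp [guess_group_votes_alt, hk, pvAltBest, pvAltPick]

-- ===== VERDICT (by name: the statement is the Claim_ definition above) =====
theorem guess_group_votes_spec : Claim_unchanged_guess_group_votes := by
  unfold Claim_unchanged_guess_group_votes Spec_guess_group_votes
  intro v1 v2 v3 gs _dom hpre hD
  have hnd : (PySem.Dict.ofList gs).keys.Nodup := PySem.Dict.nodup_keys_ofList gs
  have hval : (PySem.Dict.ofList gs).values
      = (PySem.Dict.ofList gs).keys.map (fun k => (PySem.Dict.ofList gs).getD k 0) :=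
    PySem.Dict.values_eq_map_keys _ hnd 0
  rcases hpre with hgs | ⟨q, hq, hlt⟩
  · subst hgs
    by_cases hs : |v1| + |v2| + |v3| < 999999
    · apply pvGeneric
      have hk : (PySem.Dict.ofList ([] : List (String × Int))).keys = [] := rfl
      rw [hk]
      simpa [pvBestT, pvDistT, abs_sub_comm] using hs
    · have hD' : ¬ (999999 < |v1| + |v2| + |v3|) := fun hlt => hD ⟨rfl, hlt⟩
      have h9 : |v1| + |v2| + |v3| = 999999 := le_antisymm (not_lt.mp hD') (not_lt.mp hs)
      rw [pvEmptyA v1 v2 v3 (by rw [h9]; exact lt_irrefl _), pvEmptyB, h9]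
  · apply pvGeneric
    rw [hval] at hq hlt
    set sizes := (PySem.Dict.ofList gs).keys.map (fun k => (PySem.Dict.ofList gs).getD k 0) with hsz
    obtain ⟨p, hp, hle⟩ := pvReach_le v1 v2 v3 sizes.sum sizes [(0, 0)] q hq
    have hp0 : p = ((0 : Int), (0 : Int)) := by simpa using hp
    subst hp0
    rw [pvBestT_eq_alt v1 v2 v3 sizes.sum sizes 0 0 0 (by ring)]
    exact lt_of_le_of_lt hle hlt

theorem guess_group_votes_changed : Claim_changed_guess_group_votes := by
  unfold Claim_changed_guess_group_votes; decide

theorem guess_group_votes_tight : Claim_exact_guess_group_votes := by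
  unfold Claim_exact_guess_group_votes
  intro v1 v2 v3 gs _dom _hpre hD
  obtain ⟨hgs, hlt⟩ := hD
  subst hgs
  rw [pvEmptyA v1 v2 v3 (lt_asymm hlt), pvEmptyB]
  intro hEq
  have h2 := congrArg Prod.snd hEq
  simp only at h2
  exact ne_of_lt hlt h2

@[simp] theorem guess_group_votes_raises : Claim_raises_guess_group_votes := by
  unfold Claim_raises_guess_group_votes
  constructor
  · intro v1 v2 v3 gs _dom ⟨hne, hall⟩ hpre
    rcases hpre with h | ⟨p, hp, hlt⟩
    · exact hne h
    · exact absurd (hall p hp) (not_le.mpr hlt)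
  · exact ⟨by decide, by decide, by decide⟩
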